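-- pv_equiv track=rewrite | github.com/needsomesl33p/2023-advent-of-code | 05day/main.py | convert_input
-- ===== SOURCE A (Python) =====
-- from string import ascii_lowercase
--
-- def convert_input(input_file: list[str]) -> tuple[list, dict]:
--     garden_maps: dict[str, list] = {}
--     mapping_name: str = ''
--     removed_empty_lines: list[str] = [row for row in input_file if row]
--     seeds: list[int] = string_to_int(
--         input_file[0].split(':')[1].split())
--     for line in removed_empty_lines[1:]:
--         if line[0] in ascii_lowercase:
--             mapping_name = line[:-1]
--             garden_maps[mapping_name] = []
--         else:
--             garden_maps[mapping_name].append(string_to_int(line.split()))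
--     return seeds, garden_maps
--
-- def string_to_int(list_of_strings: list[str]) -> list[int]:
--     return [int(string) for string in list_of_strings]
-- ===== SOURCE B (Python) =====
-- from string import ascii_lowercase
--
-- def convert_input(input_file):
--     seeds = [int(t) for t in input_file[0].split(':')[1].split()]
--     lines = [row for row in input_file if row][1:]
--     blocks = []
--     i = 0
--     while i < len(lines):
--         j = i + 1
--         while j < len(lines) and lines[j][0] not in ascii_lowercase:
--             j += 1
--         blocks.append((lines[i][:-1],
--                        [[int(t) for t in r.split()] for r in lines[i + 1:j]]))
--         i = j
--     return seeds, dict(blocks)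
-- ===== Notes on version B (the rewrite author's own statement) =====
-- stated objective: alternative
-- what changed: A threads a mutable (current-map-name, dict) state through one line-by-line loop that resets or appends dict entries; B instead scans the non-empty tail by index, cutting it into (header, rows) blocks with an inner while loop and slicing, and builds the dict once from the finished blocks.
import Mathlib
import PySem

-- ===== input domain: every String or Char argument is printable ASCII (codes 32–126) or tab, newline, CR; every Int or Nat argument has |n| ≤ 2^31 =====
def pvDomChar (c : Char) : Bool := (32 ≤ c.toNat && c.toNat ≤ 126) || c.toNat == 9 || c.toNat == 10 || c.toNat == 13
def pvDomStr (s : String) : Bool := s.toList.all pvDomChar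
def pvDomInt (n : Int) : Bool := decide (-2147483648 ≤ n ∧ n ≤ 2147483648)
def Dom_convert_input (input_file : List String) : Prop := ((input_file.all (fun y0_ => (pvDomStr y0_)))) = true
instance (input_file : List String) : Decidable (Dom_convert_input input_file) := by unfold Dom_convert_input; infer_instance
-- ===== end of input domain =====

-- B replaces A's stateful dict-and-current-name loop by an index-scan that cuts the non-empty
-- tail into (header, rows) blocks and builds the dict from the finished blocks; objective: alternative.

-- ===== PORT A =====
-- string_to_int: [int(s) for s in list_of_strings]  (Pre_ guarantees every int() succeeds)
def pvStrToInt (list_of_strings : List String) : List Int :=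
  list_of_strings.map (fun s => (PySem.Int.ofStr? s).getD 0)

-- 'line[0] in ascii_lowercase': first char (line is non-empty inside the loops) between 'a' and 'z'
def pvIsHeader (line : String) : Bool :=
  (PySem.Str.pyGet? line 0).any (fun c => 'a' ≤ c && c ≤ 'z')

-- seeds = string_to_int(input_file[0].split(':')[1].split()); Pre_ guarantees the two indexings succeed
def pvSeeds (input_file : List String) : List Int :=
  pvStrToInt (PySem.Str.split₀
    (PySem.List.pyGetD ((PySem.Str.split? (PySem.List.pyGetD input_file 0 "") ":").getD []) 1 ""))

-- one iteration of A's for-loop: state = (mapping_name, garden_maps)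
def pvStepA (st : String × PySem.Dict String (List (List Int))) (line : String) :
    String × PySem.Dict String (List (List Int)) :=
  if pvIsHeader line then
    let name := PySem.Str.slice line none (some (-1))
    (name, st.2.insert name [])
  else
    -- garden_maps[mapping_name].append(...): Pre_ guarantees the key is present (no KeyError)
    (st.1, st.2.modify st.1 [] (fun v => v ++ [pvStrToInt (PySem.Str.split₀ line)]))

def convert_input (input_file : List String) : List Int × (List (String × List (List Int))) :=
  let removed_empty_lines := input_file.filter (fun row => row ≠ "")
  let seeds := pvSeeds input_file
  let fin := (removed_empty_lines.drop 1).foldl pvStepA ("", PySem.Dict.empty)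
  (seeds, fin.2.items)

-- ===== PORT B =====
-- Source B's outer while loop: each step takes the header at the front, scans forward over the
-- non-header rows (inner while ⇒ takeWhile/dropWhile on the remaining list) and emits one block
def pvParseBlocks : List String → List (String × List (List Int))
  | [] => []
  | l :: ls =>
    let rows := ls.takeWhile (fun r => !pvIsHeader r)
    let rest := ls.dropWhile (fun r => !pvIsHeader r)
    (PySem.Str.slice l none (some (-1)),
      rows.map (fun r => pvStrToInt (PySem.Str.split₀ r))) :: pvParseBlocks rest
  termination_by ls => ls.length
  decreasing_by simpa using Nat.lt_succ_of_le (List.length_dropWhile_le _ _)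

def convert_input_alt (input_file : List String) : List Int × (List (String × List (List Int))) :=
  let seeds := pvSeeds input_file
  let lines := (input_file.filter (fun row => row ≠ "")).drop 1
  -- dict(blocks)
  (seeds, ((pvParseBlocks lines).foldl (fun d p => d.insert p.1 p.2)
      (PySem.Dict.empty : PySem.Dict String (List (List Int)))).items)

-- ===== PRECONDITION & SPEC =====
-- Pre_ holds exactly where the Python A returns normally; it excludes only inputs where A raises:
-- empty input / no ':' in the first line (IndexError), a seed or map row whose token is not an
-- int literal (ValueError), and a map row before the first map header (KeyError on '').
def Pre_convert_input (input_file : List String) : Prop :=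
  input_file ≠ [] ∧
  ((PySem.Str.split? (input_file.headD "") ":").getD []).length ≥ 2 ∧
  (PySem.Str.split₀ (PySem.List.pyGetD ((PySem.Str.split? (input_file.headD "") ":").getD []) 1 "")).all
    (fun t => (PySem.Int.ofStr? t).isSome) = true ∧
  (((input_file.filter (fun row => row ≠ "")).drop 1).head?.all pvIsHeader) = true ∧
  ((input_file.filter (fun row => row ≠ "")).drop 1).all
    (fun l => pvIsHeader l || (PySem.Str.split₀ l).all (fun t => (PySem.Int.ofStr? t).isSome)) = true

instance (input_file : List String) : Decidable (Pre_convert_input input_file) := by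
  unfold Pre_convert_input; infer_instance

def pvWitness_convert_input : List String :=
  ["seeds: 79 14", "", "seed-to-soil map:", "50 98 2", "52 50 48", "", "soil map:", "0 15 37"]

def Spec_convert_input (input_file : List String) (out : List Int × (List (String × List (List Int)))) : Prop := out = convert_input_alt input_file
instance (input_file : List String) (out : List Int × (List (String × List (List Int)))) : Decidable (Spec_convert_input input_file out) := by unfold Spec_convert_input; infer_instance

-- ===== CLAIM (what is proved, stated in full; the proofs are below) =====
def Claim_equal_convert_input : Prop := ∀ (input_file : List String), Dom_convert_input input_file → Pre_convert_input input_file → Spec_convert_input input_file (convert_input input_file)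

-- ===== LEMMAS AND PROOFS =====

-- modify on a just-inserted key rewrites that key's value in place
theorem pv_modify_insert {κ ν : Type} [BEq κ] [LawfulBEq κ]
    (d : PySem.Dict κ ν) (k : κ) (v d0 : ν) (f : ν → ν) :
    (d.insert k v).modify k d0 f = d.insert k (f v) := by
  show (d.insert k v).insert k (f ((d.insert k v).getD k d0)) = d.insert k (f v)
  rw [PySem.Dict.getD_insert_self, PySem.Dict.insert_insert_self]

-- A's loop over a run of non-header rows only appends to the current (just-created) entry
theorem pv_foldA_rows (rows : List String) (h : ∀ r ∈ rows, pvIsHeader r = false) :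
    ∀ (n : String) (d : PySem.Dict String (List (List Int))) (v : List (List Int)),
    rows.foldl pvStepA (n, d.insert n v)
      = (n, d.insert n (v ++ rows.map (fun r => pvStrToInt (PySem.Str.split₀ r)))) := by
  induction rows with
  | nil => intro n d v; simp
  | cons r rows ih =>
    intro n d v
    have hr : pvIsHeader r = false := h r (List.mem_cons_self ..)
    have hrest : ∀ r' ∈ rows, pvIsHeader r' = false := fun r' hr' => h r' (List.mem_cons_of_mem _ hr')
    simp only [List.foldl_cons, pvStepA, hr, Bool.false_eq_true, if_false]
    rw [pv_modify_insert, ih hrest n d (v ++ [pvStrToInt (PySem.Str.split₀ r)])]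
    simp

theorem pv_head_dropWhile {α : Type} (p : α → Bool) (l : List α) :
    ∀ x ∈ (l.dropWhile p).head?, p x = false := by
  induction l with
  | nil => simp
  | cons a l ih =>
    intro x hx
    by_cases hp : p a = true
    · rw [List.dropWhile_cons_of_pos hp] at hx; exact ih x hx
    · rw [List.dropWhile_cons_of_neg hp] at hx
      simp only [List.head?_cons, Option.mem_def, Option.some.injEq] at hx
      subst hx; exact Bool.eq_false_iff.mpr hp

-- main simulation: A's fold over lines whose first element (if any) is a header equals
-- folding insert over B's block list, from any start dict and any current name
theorem pv_main : ∀ (N : Nat) (ls : List String), ls.length ≤ N →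
    (∀ l ∈ ls.head?, pvIsHeader l = true) →
    ∀ (n : String) (d : PySem.Dict String (List (List Int))),
    (ls.foldl pvStepA (n, d)).2 = (pvParseBlocks ls).foldl (fun d p => d.insert p.1 p.2) d := by
  intro N
  induction N with
  | zero =>
    intro ls hlen _ n d
    have : ls = [] := List.eq_nil_of_length_eq_zero (Nat.le_zero.mp hlen)
    subst this; simp [pvParseBlocks]
  | succ N ih =>
    intro ls hlen hhd n d
    match ls with
    | [] => simp [pvParseBlocks]
    | l :: tl =>
      have hl : pvIsHeader l = true := hhd l (by simp)
      have hsplit : tl.takeWhile (fun r => !pvIsHeader r) ++ tl.dropWhile (fun r => !pvIsHeader r) = tl :=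
        List.takeWhile_append_dropWhile
      have hrows : ∀ r ∈ tl.takeWhile (fun r => !pvIsHeader r), pvIsHeader r = false := by
        intro r hr
        have := List.mem_takeWhile_imp hr
        simpa using this
      have hrest_hd : ∀ x ∈ (tl.dropWhile (fun r => !pvIsHeader r)).head?, pvIsHeader x = true := by
        intro x hx
        have := pv_head_dropWhile (fun r => !pvIsHeader r) tl x hx
        simpa using this
      have hrest_len : (tl.dropWhile (fun r => !pvIsHeader r)).length ≤ N := by
        have h1 := List.length_dropWhile_le (fun r => !pvIsHeader r) tl
        have h2 : tl.length + 1 ≤ N + 1 := by simpa using hlen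
        omega
      rw [pvParseBlocks]
      simp only [List.foldl_cons]
      rw [pvStepA]
      simp only [hl, if_true]
      conv_lhs => rw [← hsplit, List.foldl_append]
      rw [pv_foldA_rows _ hrows, List.nil_append]
      exact ih _ hrest_len hrest_hd _ _

-- ===== VERDICT (by name: the statement is the Claim_ definition above) =====
theorem convert_input_spec : Claim_equal_convert_input := by
  intro input_file _ hpre
  obtain ⟨-, -, -, hhd, -⟩ := hpre
  show convert_input input_file = convert_input_alt input_file
  have hhd' : ∀ l ∈ ((input_file.filter (fun row => row ≠ "")).drop 1).head?, pvIsHeader l = true := by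
    intro l hl
    simp only [Option.mem_def] at hl
    rw [hl] at hhd
    simpa using hhd
  unfold convert_input convert_input_alt
  dsimp only
  rw [pv_main ((input_file.filter (fun row => row ≠ "")).drop 1).length _ le_rfl hhd' "" PySem.Dict.empty]
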